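-- pv_equiv track=rewrite | github.com/4lparslan/AI-Vote-Counter | identify_regions.py | checkForLength
-- ===== SOURCE A (Python) =====
-- def checkForLength(scanner, t):
--     t = int(t)
--     lengths = []
--     start_index = -1
--     for i in range(len(scanner)):
--         if scanner[i] == 255:
--             if start_index == -1:
--                 start_index = i
--         else:
--             if start_index != -1:
--                 if i - start_index > t:
--                     lengths.append((start_index, i - 1))
--                 start_index = -1
--
--     if (start_index != -1) and (len(scanner) - start_index > t):
--         lengths.append((start_index, len(scanner) - 1))
--     return lengths
-- ===== SOURCE B (Python) =====
-- def checkForLength(scanner, t):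
--     t = int(t)
--     lengths = []
--     n = len(scanner)
--     idx = 0
--     while idx < n:
--         j = idx
--         while j < n and scanner[j] == scanner[idx]:
--             j += 1
--         if scanner[idx] == 255 and j - idx > t:
--             lengths.append((idx, j - 1))
--         idx = j
--     return lengths
-- ===== Notes on version B (the rewrite author's own statement) =====
-- stated objective: simpler
-- what changed: B scans run-by-run (advancing past each maximal run of equal values in one inner scan) instead of A's per-element loop with a start_index sentinel and a separate end-of-array flush.
import Mathlib
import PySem

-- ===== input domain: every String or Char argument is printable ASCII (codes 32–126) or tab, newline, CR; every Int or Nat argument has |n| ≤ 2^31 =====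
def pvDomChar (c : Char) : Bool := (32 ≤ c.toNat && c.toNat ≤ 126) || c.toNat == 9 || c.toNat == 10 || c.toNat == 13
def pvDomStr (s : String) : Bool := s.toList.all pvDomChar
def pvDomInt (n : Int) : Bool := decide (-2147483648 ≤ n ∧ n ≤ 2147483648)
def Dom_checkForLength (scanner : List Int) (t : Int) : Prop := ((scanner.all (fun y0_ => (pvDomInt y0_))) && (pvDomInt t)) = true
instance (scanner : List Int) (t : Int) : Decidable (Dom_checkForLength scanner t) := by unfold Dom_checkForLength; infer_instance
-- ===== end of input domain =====

-- B replaces A's per-element loop (start_index sentinel + separate end-of-array flush) by a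
-- run-by-run scan; objective: simpler, same O(n) cost.

-- ===== PORT A =====
-- A: `for i in range(len(scanner))` with state (lengths, start_index), then the final flush.
-- scanner[i] is always in range here, so pyGetD with default 0 is exact.
def checkForLength (scanner : List Int) (t : Int) : List (Int × Int) :=
  let st := (PySem.List.pyRange 0 (scanner.length : Int) 1).foldl
    (fun (s : List (Int × Int) × Int) i =>
      if PySem.List.pyGetD scanner i 0 = 255 then
        (s.1, if s.2 = -1 then i else s.2)
      else
        if s.2 ≠ -1 then
          ((if i - s.2 > t then s.1 ++ [(s.2, i - 1)] else s.1), -1)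
        else s)
    ([], -1)
  if st.2 ≠ -1 ∧ (scanner.length : Int) - st.2 > t then
    st.1 ++ [(st.2, (scanner.length : Int) - 1)]
  else st.1

-- ===== PORT B =====
-- B's outer while-loop, one step per maximal run: the inner `while j < n and scanner[j] ==
-- scanner[idx]` is the takeWhile/dropWhile split of the tail, j = idx + run length.
def checkForLength_altGo (t : Int) : List Int → Int → List (Int × Int)
  | [], _ => []
  | x :: xs, idx =>
    let run := xs.takeWhile (· = x)
    let rest := xs.dropWhile (· = x)
    let j : Int := idx + (run.length : Int) + 1
    (if x = 255 ∧ j - idx > t then [(idx, j - 1)] else []) ++ checkForLength_altGo t rest j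
  termination_by xs => xs.length
  decreasing_by
    simp only [List.length_cons]
    exact Nat.lt_succ_of_le (List.length_dropWhile_le _ _)

def checkForLength_alt (scanner : List Int) (t : Int) : List (Int × Int) :=
  checkForLength_altGo t scanner 0

-- ===== PRECONDITION & SPEC =====
def Spec_checkForLength (scanner : List Int) (t : Int) (out : List (Int × Int)) : Prop := out = checkForLength_alt scanner t
instance (scanner : List Int) (t : Int) (out : List (Int × Int)) : Decidable (Spec_checkForLength scanner t out) := by unfold Spec_checkForLength; infer_instance

-- ===== CLAIM (what is proved, stated in full; the proofs are below) =====
def Claim_equal_checkForLength : Prop := ∀ (scanner : List Int) (t : Int), Dom_checkForLength scanner t → Spec_checkForLength scanner t (checkForLength scanner t)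

-- ===== LEMMAS AND PROOFS =====

-- recursive characterisation of A's loop together with its final flush; i is the current
-- index, the [] case is the end-of-array flush with i = len(scanner)
def aGo (t : Int) : List Int → Int → List (Int × Int) × Int → List (Int × Int)
  | [], i, (acc, start) => if start ≠ -1 ∧ i - start > t then acc ++ [(start, i - 1)] else acc
  | x :: xs, i, (acc, start) =>
    if x = 255 then aGo t xs (i + 1) (acc, if start = -1 then i else start)
    else if start ≠ -1 then
      aGo t xs (i + 1) ((if i - start > t then acc ++ [(start, i - 1)] else acc), -1)
    else aGo t xs (i + 1) (acc, start)

theorem aGo_run255 (t : Int) :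
    ∀ (ys rest : List Int) (i start : Int) (acc : List (Int × Int)),
      (∀ y ∈ ys, y = 255) → start ≠ -1 →
      aGo t (ys ++ rest) i (acc, start) = aGo t rest (i + (ys.length : Int)) (acc, start) := by
  intro ys
  induction ys with
  | nil => intro rest i start acc _ _; simp
  | cons y ys ih =>
    intro rest i start acc hall hs
    have hy : y = 255 := hall y (by simp)
    have : aGo t ((y :: ys) ++ rest) i (acc, start)
        = aGo t (ys ++ rest) (i + 1) (acc, start) := by
      simp [aGo, hy, hs]
    rw [this, ih rest (i + 1) start acc (fun z hz => hall z (by simp [hz])) hs]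
    congr 1
    simp only [List.length_cons]
    push_cast
    ring

theorem altGo_skip (t : Int) (x : Int) (xs : List Int) (i : Int) (hx : x ≠ 255) :
    checkForLength_altGo t (x :: xs) i = checkForLength_altGo t xs (i + 1) := by
  cases xs with
  | nil => simp [checkForLength_altGo, hx]
  | cons y ys =>
    by_cases hxy : y = x
    · subst hxy
      rw [checkForLength_altGo, checkForLength_altGo]
      simp only [hx, List.takeWhile_cons, List.dropWhile_cons]
      simp
      congr 1
      ring
    · rw [checkForLength_altGo]
      simp [hx, hxy]


theorem altGo_nil (t j : Int) : checkForLength_altGo t [] j = [] := by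
  rw [checkForLength_altGo.eq_def]

theorem aGo_eq_altGo (t : Int) :
    ∀ (n : Nat) (xs : List Int), xs.length ≤ n → ∀ (i : Int) (acc : List (Int × Int)),
      0 ≤ i → aGo t xs i (acc, -1) = acc ++ checkForLength_altGo t xs i := by
  intro n
  induction n with
  | zero =>
    intro xs hlen i acc _
    have : xs = [] := List.length_eq_zero_iff.mp (Nat.le_zero.mp hlen)
    subst this
    simp [aGo, altGo_nil]
  | succ n ih =>
    intro xs hlen i acc hi
    cases xs with
    | nil => simp [aGo, altGo_nil]
    | cons x xs =>
      have hi' : i ≠ -1 := by omega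
      by_cases hx : x = 255
      · subst hx
        have step : aGo t (255 :: xs) i (acc, -1) = aGo t xs (i + 1) (acc, i) := by
          simp [aGo]
        rw [step, checkForLength_altGo]
        simp only
        set tw := xs.takeWhile (fun y => decide (y = (255:Int))) with htw
        set dw := xs.dropWhile (fun y => decide (y = (255:Int))) with hdw
        have hsplit : xs = tw ++ dw := by
          rw [htw, hdw]; exact (List.takeWhile_append_dropWhile).symm
        have hall : ∀ y ∈ tw, y = 255 := by
          intro y hy
          rw [htw] at hy
          simpa using List.mem_takeWhile_imp hy
        conv_lhs => rw [hsplit]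
        rw [aGo_run255 t _ _ _ _ _ hall hi',
          show i + 1 + (tw.length : Int) = i + (tw.length : Int) + 1 from by ring]
        cases hdwc : dw with
        | nil =>
          rw [aGo, altGo_nil]
          simp only [hi', ne_eq, not_false_iff, true_and, List.append_nil]
          split_ifs with h1
          · simp
          · simp
        | cons r rs =>
          have hne : dw ≠ [] := by rw [hdwc]; simp
          have hr : r ≠ 255 := by
            have h := List.head_dropWhile_not (l := xs) (fun y => decide (y = (255:Int)))
              (by rw [← hdw]; exact hne)
            have hh : (xs.dropWhile (fun y => decide (y = (255:Int)))).head
                (by rw [← hdw]; exact hne) = r := by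
              have h9 : (xs.dropWhile (fun y => decide (y = (255:Int)))).head? = some r := by
                rw [← hdw, hdwc]; rfl
              rw [List.head?_eq_some_head (by rw [← hdw]; exact hne)] at h9
              exact Option.some.inj h9
            rw [hh] at h
            simpa using h
          have hlen' : rs.length ≤ n := by
            have h1 : dw.length ≤ xs.length := by
              rw [hdw]; exact List.length_dropWhile_le _ _
            rw [hdwc] at h1
            simp only [List.length_cons] at h1 hlen
            omega
          rw [aGo]
          rw [if_neg hr, if_pos hi']
          rw [ih rs hlen' (i + (tw.length : Int) + 1 + 1) _ (by omega),
              altGo_skip t r rs (i + (tw.length : Int) + 1) hr]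
          split_ifs with h1 h2
          · simp
          · simp at h2; omega
          · simp at h1; omega
          · simp
      · have step : aGo t (x :: xs) i (acc, -1) = aGo t xs (i + 1) (acc, -1) := by
          simp [aGo, hx]
        rw [step, ih xs (by simpa using Nat.lt_succ_iff.mp (Nat.lt_of_lt_of_le (by simp) hlen)) (i+1) acc (by omega),
            altGo_skip t x xs i hx]


theorem checkForLength_eq_aGo_aux (t : Int) :
    ∀ (xs pre : List Int) (s : List (Int × Int) × Int),
      (let scanner := pre ++ xs
       let st := (PySem.List.pyRange (pre.length : Int) (scanner.length : Int) 1).foldl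
         (fun (s : List (Int × Int) × Int) i =>
           if PySem.List.pyGetD scanner i 0 = 255 then
             (s.1, if s.2 = -1 then i else s.2)
           else
             if s.2 ≠ -1 then
               ((if i - s.2 > t then s.1 ++ [(s.2, i - 1)] else s.1), -1)
             else s) s
       if st.2 ≠ -1 ∧ (scanner.length : Int) - st.2 > t then
         st.1 ++ [(st.2, (scanner.length : Int) - 1)]
       else st.1) = aGo t xs (pre.length : Int) s := by
  intro xs
  induction xs with
  | nil =>
    intro pre s
    obtain ⟨acc, start⟩ := s
    dsimp only
    rw [List.append_nil, PySem.List.pyRange_one_eq_nil le_rfl, List.foldl_nil, aGo]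
  | cons x xs ihx =>
    intro pre s
    obtain ⟨acc, start⟩ := s
    dsimp only
    have hb : (pre.length : Int) < ((pre ++ x :: xs).length : Int) := by
      simp only [List.length_append, List.length_cons]
      push_cast
      omega
    rw [PySem.List.pyRange_one_cons hb, List.foldl_cons]
    have hget : PySem.List.pyGetD (pre ++ x :: xs) (pre.length : Int) 0 = x := by
      rw [PySem.List.pyGetD_eq_getElem]
      · simp
      · exact Int.natCast_nonneg _
      · simp only [List.length_append, List.length_cons]; push_cast; omega
    have hrec := ihx (pre ++ [x])
      (if PySem.List.pyGetD (pre ++ x :: xs) (pre.length : Int) 0 = 255 then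
         (acc, if start = -1 then (pre.length : Int) else start)
       else
         if start ≠ -1 then
           ((if (pre.length : Int) - start > t then acc ++ [(start, (pre.length : Int) - 1)] else acc), -1)
         else (acc, start))
    dsimp only at hrec
    rw [List.append_assoc] at hrec
    simp only [List.singleton_append] at hrec
    have hlen1 : (((pre ++ [x]).length : Nat) : Int) = (pre.length : Int) + 1 := by
      simp
    rw [hlen1] at hrec
    dsimp only
    refine hrec.trans ?_
    rw [aGo, hget]
    by_cases h255 : x = 255
    · rw [if_pos h255, if_pos h255]
    · rw [if_neg h255, if_neg h255]
      by_cases hst : start ≠ -1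
      · rw [if_pos hst, if_pos hst]
      · rw [if_neg hst, if_neg hst]

theorem checkForLength_eq_aGo (scanner : List Int) (t : Int) :
    checkForLength scanner t = aGo t scanner 0 ([], -1) := by
  have h := checkForLength_eq_aGo_aux t scanner [] ([], -1)
  simpa [checkForLength] using h

-- ===== VERDICT (by name: the statement is the Claim_ definition above) =====
theorem checkForLength_spec : Claim_equal_checkForLength := by
  intro scanner t _
  unfold Spec_checkForLength checkForLength_alt
  rw [checkForLength_eq_aGo]
  simpa using aGo_eq_altGo t scanner.length scanner le_rfl 0 [] le_rfl
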